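-- pv_equiv track=rewrite | github.com/astonm/advent-of-code-2019 | day12/code.py | gravity_for
-- ===== SOURCE A (Python) =====
-- def gravity_for(vals):
--     vals.sort()
--     # if len(set(vals)) == len(vals):
--     #     return {vals[0]: 3, vals[1]: 1, vals[2]: -1, vals[3]: -3}
--
--     lt = {}
--     n = 0
--     p = None
--     for i, v in enumerate(vals):
--         if v != p:
--             n = i
--         p = v
--         lt[v] = n
--
--     gt = {}
--     n = 0
--     p = None
--     for i, v in enumerate(vals[::-1]):
--         if v != p:
--             n = i
--         p = v
--         gt[v] = n
--
--     return {k: gt[k] - lt[k] for k in lt}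
-- ===== SOURCE B (Python) =====
-- def gravity_for(vals):
--     # single ascending sweep over the runs of the sorted list:
--     # for each distinct value v, answer = (#elements > v) - (#elements < v)
--     vals.sort()
--     n = len(vals)
--     runs = []
--     i = 0
--     while i < n:
--         j = i + 1
--         while j < n and vals[j] == vals[i]:
--             j += 1
--         runs.append((vals[i], j - i))
--         i = j
--     result = {}
--     running = 0
--     for v, c in runs:
--         result[v] = (n - running - c) - running
--         running += c
--     return result
-- ===== Notes on version B (the rewrite author's own statement) =====
-- stated objective: alternative
-- what changed: Replaces A's two full passes (forward and over the reversed list, each maintaining first-index dicts) plus a final dict comprehension by one run-length grouping of the sorted list and a single prefix-count sweep computing (#greater - #less) per distinct value directly.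
import Mathlib
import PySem

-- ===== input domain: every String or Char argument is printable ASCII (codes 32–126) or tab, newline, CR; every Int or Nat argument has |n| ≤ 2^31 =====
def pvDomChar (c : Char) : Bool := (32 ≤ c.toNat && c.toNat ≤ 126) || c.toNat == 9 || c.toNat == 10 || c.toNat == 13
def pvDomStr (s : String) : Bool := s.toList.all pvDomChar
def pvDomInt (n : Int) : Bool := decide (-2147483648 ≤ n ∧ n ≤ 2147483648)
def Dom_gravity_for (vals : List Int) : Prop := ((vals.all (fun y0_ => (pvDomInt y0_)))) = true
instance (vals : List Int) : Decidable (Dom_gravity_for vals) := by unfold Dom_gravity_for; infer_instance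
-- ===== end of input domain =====

-- B replaces A's two first-index passes (forward and reversed) + final comprehension by one
-- run-length grouping of the sorted list and a single prefix-count sweep (objective: alternative).
-- Both Pythons sort `vals` in place; the equivalence proved here is about the RETURN value
-- (both perform the identical mutation anyway).

-- ===== PORT A =====
-- the two identical for-loops of A (state: n, p, dict); returns the full loop state
def pvLtLoop : List Int → Int → Int → Option Int → PySem.Dict Int Int → Int × Option Int × PySem.Dict Int Int
  | [], _, n, p, d => (n, p, d)
  | v :: rest, i, n, p, d =>
      let n' := if some v ≠ p then i else n
      pvLtLoop rest (i + 1) n' (some v) (d.insert v n')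

def gravity_for (vals : List Int) : List (Int × Int) :=
  let s := PySem.List.sorted vals (fun x => x) false     -- vals.sort()
  let lt := (pvLtLoop s 0 0 none PySem.Dict.empty).2.2
  let rev := (PySem.List.slice? s none none (-1)).getD []  -- vals[::-1]; step ≠ 0, always `some`
  let gt := (pvLtLoop rev 0 0 none PySem.Dict.empty).2.2
  -- {k: gt[k] - lt[k] for k in lt}; gt[k] never misses a key of lt, so getD is exact
  (lt.items.foldl (fun acc kv => acc.insert kv.1 (gt.getD kv.1 0 - kv.2)) PySem.Dict.empty).items

-- ===== PORT B =====
-- runs of the sorted list: (value, multiplicity); the inner `while vals[j] == vals[i]` is takeWhile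
def pvRuns : List Int → List (Int × Int)
  | [] => []
  | v :: rest =>
      (v, 1 + ((rest.takeWhile (· == v)).length : Int)) :: pvRuns (rest.dropWhile (· == v))
  termination_by l => l.length
  decreasing_by
    have := List.length_dropWhile_le (· == v) rest
    simp only [List.length_cons]; omega

def pvSweep (n : Int) : List (Int × Int) → Int → List (Int × Int)
  | [], _ => []
  | (v, c) :: rs, running => (v, (n - running - c) - running) :: pvSweep n rs (running + c)

def gravity_for_alt (vals : List Int) : List (Int × Int) :=
  let s := PySem.List.sorted vals (fun x => x) false     -- vals.sort()
  pvSweep (s.length : Int) (pvRuns s) 0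

-- ===== PRECONDITION & SPEC =====
def Spec_gravity_for (vals : List Int) (out : List (Int × Int)) : Prop := out = gravity_for_alt vals
instance (vals : List Int) (out : List (Int × Int)) : Decidable (Spec_gravity_for vals out) := by unfold Spec_gravity_for; infer_instance

-- ===== CLAIM (what is proved, stated in full; the proofs are below) =====
def Claim_equal_gravity_for : Prop := ∀ (vals : List Int), Dom_gravity_for vals → Spec_gravity_for vals (gravity_for vals)

-- ===== LEMMAS AND PROOFS =====

-- the lt/gt dicts as plain entry lists over the runs: (value, position of its first index)
def pvLtE : List (Int × Int) → Int → List (Int × Int)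
  | [], _ => []
  | (v, c) :: rs, i => (v, i) :: pvLtE rs (i + c)

def pvSum (rs : List (Int × Int)) : Int := (rs.map Prod.snd).sum

theorem pv_run_decomp (v : Int) (rest : List Int) :
    v :: rest = List.replicate (1 + (rest.takeWhile (· == v)).length) v ++ rest.dropWhile (· == v) := by
  have ht : rest.takeWhile (· == v) = List.replicate (rest.takeWhile (· == v)).length v := by
    rw [List.eq_replicate_iff]
    exact ⟨rfl, fun b hb => by simpa using List.mem_takeWhile_imp hb⟩
  have hrep : List.replicate (1 + (rest.takeWhile (· == v)).length) v =
      v :: List.replicate (rest.takeWhile (· == v)).length v := by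
    rw [Nat.add_comm, List.replicate_succ]
  rw [hrep, ← ht, List.cons_append, List.takeWhile_append_dropWhile]

theorem pv_gt_drop {v : Int} {rest : List Int} (h : (v :: rest).Pairwise (· ≤ ·)) :
    ∀ x ∈ rest.dropWhile (· == v), v < x := by
  intro x hx
  have hle : ∀ y ∈ rest, v ≤ y := (List.pairwise_cons.1 h).1
  have hrest : rest.Pairwise (· ≤ ·) := (List.pairwise_cons.1 h).2
  cases hd : rest.dropWhile (· == v) with
  | nil => simp [hd] at hx
  | cons w ds =>
    have hw : ¬ (w == v) = true := by
      have := List.head_dropWhile_not (· == v) (l := rest) (by simp [hd])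
      simpa [hd] using this
    have hwmem : w ∈ rest := (List.dropWhile_sublist (· == v)).mem (by simp [hd])
    have hne : v ≠ w := by intro he; subst he; simp at hw
    have hvw : v < w := lt_of_le_of_ne (hle w hwmem) hne
    rw [hd] at hx
    rcases List.mem_cons.1 hx with rfl | hxds
    · exact hvw
    · have hdp : (rest.dropWhile (· == v)).Pairwise (· ≤ ·) :=
        hrest.sublist (List.dropWhile_sublist (· == v))
      rw [hd] at hdp
      exact lt_of_lt_of_le hvw ((List.pairwise_cons.1 hdp).1 x hxds)

theorem pv_sum_runs (s : List Int) : pvSum (pvRuns s) = (s.length : Int) := by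
  induction s using pvRuns.induct with
  | case1 => rw [pvRuns]; rfl
  | case2 v rest ih =>
    rw [pvRuns]
    have hlen := congrArg List.length (List.takeWhile_append_dropWhile (p := (· == v)) (l := rest))
    simp only [List.length_append] at hlen
    simp only [pvSum, List.map_cons, List.sum_cons] at *
    rw [ih]
    simp only [List.length_cons]
    omega

theorem pv_runs_key_mem (s : List Int) : ∀ a ∈ pvRuns s, a.1 ∈ s := by
  induction s using pvRuns.induct with
  | case1 => simp [pvRuns]
  | case2 v rest ih =>
    rw [pvRuns]
    intro a ha
    rcases List.mem_cons.1 ha with rfl | ha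
    · simp
    · exact List.mem_cons_of_mem _ ((List.dropWhile_sublist (· == v)).subset (ih a ha))

theorem pv_runs_pairwise {s : List Int} (hs : s.Pairwise (· ≤ ·)) :
    (pvRuns s).Pairwise (fun a b => a.1 < b.1) := by
  induction s using pvRuns.induct with
  | case1 => simp [pvRuns]
  | case2 v rest ih =>
    rw [pvRuns]
    have hd : (rest.dropWhile (· == v)).Pairwise (· ≤ ·) :=
      ((List.pairwise_cons.1 hs).2).sublist (List.dropWhile_sublist (· == v))
    refine List.pairwise_cons.2 ⟨?_, ih hd⟩
    intro b hb
    exact pv_gt_drop hs b.1 (pv_runs_key_mem _ b hb)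

theorem pv_loop_append (xs ys : List Int) (i n : Int) (p : Option Int) (d : PySem.Dict Int Int) :
    pvLtLoop (xs ++ ys) i n p d =
      pvLtLoop ys (i + (xs.length : Int)) (pvLtLoop xs i n p d).1 (pvLtLoop xs i n p d).2.1
        (pvLtLoop xs i n p d).2.2 := by
  induction xs generalizing i n p d with
  | nil => simp [pvLtLoop]
  | cons v rest ih =>
    simp only [List.cons_append, pvLtLoop]
    rw [ih]
    simp only [List.length_cons]
    congr 1
    push_cast
    ring

theorem pv_loop_run2 (c : Nat) (tail : List Int) (j i v : Int) (E : PySem.Dict Int Int) :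
    pvLtLoop (List.replicate c v ++ tail) j i (some v) (E.insert v i) =
      pvLtLoop tail (j + (c : Int)) i (some v) (E.insert v i) := by
  induction c generalizing j with
  | zero => simp
  | succ m ih =>
    rw [List.replicate_succ]
    simp only [List.cons_append, pvLtLoop]
    have h0 : (if some v ≠ some v then j else i) = i := by simp
    rw [h0, PySem.Dict.insert_insert_self, ih]
    congr 1
    push_cast
    ring

theorem pv_loop_run (c : Nat) (hc : 1 ≤ c) (tail : List Int) (i n v : Int) (p : Option Int)
    (hp : p ≠ some v) (E : PySem.Dict Int Int) :
    pvLtLoop (List.replicate c v ++ tail) i n p E =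
      pvLtLoop tail (i + (c : Int)) i (some v) (E.insert v i) := by
  obtain ⟨m, rfl⟩ : ∃ m, c = m + 1 := ⟨c - 1, by omega⟩
  rw [List.replicate_succ]
  simp only [List.cons_append, pvLtLoop]
  have h0 : (if some v ≠ p then i else n) = i := if_pos (Ne.symm hp)
  rw [h0, pv_loop_run2]
  congr 1
  push_cast
  ring

theorem pv_loop_p (xs : List Int) (i n : Int) (p : Option Int) (d : PySem.Dict Int Int) :
    (pvLtLoop xs i n p d).2.1 = xs.getLast?.or p := by
  induction xs generalizing i n p d with
  | nil => simp [pvLtLoop]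
  | cons v rest ih =>
    simp only [pvLtLoop]
    rw [ih]
    cases rest with
    | nil => simp
    | cons w ws =>
      rw [List.getLast?_cons_cons]
      cases h : (w :: ws).getLast? with
      | none => simp at h
      | some a => rfl

theorem pv_loop_contains (xs : List Int) (i n : Int) (p : Option Int) (d : PySem.Dict Int Int)
    (k : Int) :
    (pvLtLoop xs i n p d).2.2.contains k = (d.contains k || decide (k ∈ xs)) := by
  induction xs generalizing i n p d with
  | nil => simp [pvLtLoop]
  | cons v rest ih =>
    simp only [pvLtLoop]
    rw [ih, PySem.Dict.contains_insert]
    by_cases hk : k = v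
    · simp [hk]
    · have hb : (k == v) = false := by simpa using hk
      simp [hb, hk]

theorem pv_L1 (s : List Int) (hs : s.Pairwise (· ≤ ·)) :
    ∀ (i n : Int) (p : Option Int) (D : PySem.Dict Int Int),
      (∀ x ∈ s, p ≠ some x) → (∀ x ∈ s, D.contains x = false) →
      (pvLtLoop s i n p D).2.2 = PySem.Dict.mk (D.items ++ pvLtE (pvRuns s) i) := by
  induction s using pvRuns.induct with
  | case1 =>
    intro i n p D _ _
    rw [pvRuns]
    apply PySem.Dict.ext
    simp [pvLtLoop, pvLtE]
  | case2 v rest ih =>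
    intro i n p D hp hD
    have hdrop := pv_gt_drop hs
    have hdpw : (rest.dropWhile (· == v)).Pairwise (· ≤ ·) :=
      ((List.pairwise_cons.1 hs).2).sublist (List.dropWhile_sublist (· == v))
    have hvD : D.contains v = false := hD v (by simp)
    have hstep : pvLtLoop (v :: rest) i n p D =
        pvLtLoop (rest.dropWhile (· == v)) (i + ((1 + (rest.takeWhile (· == v)).length : Nat) : Int))
          i (some v) (D.insert v i) := by
      conv_lhs => rw [pv_run_decomp v rest]
      exact pv_loop_run _ (by omega) _ i n v p (hp v (by simp)) D
    rw [hstep, ih hdpw _ i (some v) (D.insert v i)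
      (fun x hx => by simpa using (ne_of_lt (hdrop x hx)))
      (fun x hx => by
        rw [PySem.Dict.contains_insert]
        have hxv : x ≠ v := (ne_of_gt (hdrop x hx))
        have hxs : x ∈ v :: rest := List.mem_cons_of_mem _ ((List.dropWhile_sublist (· == v)).mem hx)
        simp [hxv, hD x hxs])]
    rw [PySem.Dict.items_insert_of_not_contains _ _ hvD]
    rw [pvRuns]
    simp only [pvLtE, List.append_assoc, List.cons_append, List.nil_append]
    norm_num

theorem pv_ltE_append (a b : List (Int × Int)) (i : Int) :
    pvLtE (a ++ b) i = pvLtE a i ++ pvLtE b (i + pvSum a) := by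
  induction a generalizing i with
  | nil => simp [pvLtE, pvSum]
  | cons hd tl ih =>
    obtain ⟨v, c⟩ := hd
    simp only [List.cons_append, pvLtE, ih, pvSum, List.map_cons, List.sum_cons]
    congr 3
    ring

theorem pv_ltE_keys (rs : List (Int × Int)) (i : Int) :
    (pvLtE rs i).map Prod.fst = rs.map Prod.fst := by
  induction rs generalizing i with
  | nil => simp [pvLtE]
  | cons hd tl ih => obtain ⟨v, c⟩ := hd; simp [pvLtE, ih]

theorem pv_L2 (s : List Int) (hs : s.Pairwise (· ≤ ·)) :
    (pvLtLoop s.reverse 0 0 none PySem.Dict.empty).2.2 =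
      PySem.Dict.mk (pvLtE ((pvRuns s).reverse) 0) := by
  induction s using pvRuns.induct with
  | case1 => rw [pvRuns]; rfl
  | case2 v rest ih =>
    have hdrop := pv_gt_drop hs
    have hdpw : (rest.dropWhile (· == v)).Pairwise (· ≤ ·) :=
      ((List.pairwise_cons.1 hs).2).sublist (List.dropWhile_sublist (· == v))
    set d := rest.dropWhile (· == v) with hd
    set c := 1 + (rest.takeWhile (· == v)).length with hc
    have hrev : (v :: rest).reverse = d.reverse ++ List.replicate c v := by
      conv_lhs => rw [pv_run_decomp v rest]
      rw [List.reverse_append, List.reverse_replicate]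
    rw [hrev, pv_loop_append]
    set st := pvLtLoop d.reverse 0 0 none PySem.Dict.empty with hst
    have hp : st.2.1 ≠ some v := by
      rw [hst, pv_loop_p, List.getLast?_reverse]
      cases hdd : d with
      | nil => simp
      | cons w ws =>
        have : v < w := hdrop w (by rw [hdd]; simp)
        simp [ne_of_gt this]
    have hcont : st.2.2.contains v = false := by
      rw [hst, pv_loop_contains]
      have : v ∉ d.reverse := by
        intro hv
        exact absurd (hdrop v (by simpa using hv)) (lt_irrefl v)
      simp [this]
    have hrun : pvLtLoop (List.replicate c v) (0 + (d.reverse.length : Int)) st.1 st.2.1 st.2.2 =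
        pvLtLoop [] ((0 + (d.reverse.length : Int)) + (c : Int)) (0 + (d.reverse.length : Int))
          (some v) (st.2.2.insert v (0 + (d.reverse.length : Int))) := by
      have := pv_loop_run c (by omega) [] (0 + (d.reverse.length : Int)) st.1 v st.2.1 hp st.2.2
      simpa using this
    rw [show List.replicate c v = List.replicate c v ++ [] by simp] at hrun ⊢
    rw [hrun]
    simp only [pvLtLoop]
    apply PySem.Dict.ext
    rw [PySem.Dict.items_insert_of_not_contains _ _ hcont]
    have hitems : st.2.2.items = pvLtE ((pvRuns d).reverse) 0 := by
      rw [hst, ih hdpw]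
    rw [hitems, pvRuns, ← hd]
    rw [List.reverse_cons, pv_ltE_append]
    have hsum : pvSum ((pvRuns d).reverse) = (d.length : Int) := by
      rw [pvSum, List.map_reverse, List.sum_reverse, ← pvSum, pv_sum_runs]
    simp [pvLtE, hsum]

theorem pv_get_mk_append_right (l1 l2 : List (Int × Int)) (v : Int) (h : v ∉ l1.map Prod.fst) :
    (PySem.Dict.mk (l1 ++ l2)).get? v = (PySem.Dict.mk l2).get? v := by
  induction l1 with
  | nil => simp
  | cons hd tl ih =>
    obtain ⟨k, w⟩ := hd
    simp only [List.map_cons, List.mem_cons] at h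
    push Not at h
    rw [List.cons_append, PySem.Dict.get?_mk_cons]
    rw [if_neg (by simp [Ne.symm h.1])]
    exact ih h.2

theorem pv_get_mk_append_left (l1 l2 : List (Int × Int)) (v : Int) (h : v ∈ l1.map Prod.fst) :
    (PySem.Dict.mk (l1 ++ l2)).get? v = (PySem.Dict.mk l1).get? v := by
  induction l1 with
  | nil => simp at h
  | cons hd tl ih =>
    obtain ⟨k, w⟩ := hd
    rw [List.cons_append, PySem.Dict.get?_mk_cons, PySem.Dict.get?_mk_cons]
    by_cases hk : (k == v) = true
    · rw [if_pos hk, if_pos hk]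
    · rw [if_neg hk, if_neg hk]
      apply ih
      simp only [List.map_cons, List.mem_cons] at h
      rcases h with rfl | h
      · simp at hk
      · exact h

theorem pv_G (rs : List (Int × Int)) (hrs : rs.Pairwise (fun a b => a.1 < b.1)) :
    ∀ v c, (v, c) ∈ rs →
      (PySem.Dict.mk (pvLtE rs.reverse 0)).getD v 0 =
        pvSum (rs.filter (fun a => decide (v < a.1))) := by
  induction rs with
  | nil => intro v c h; simp at h
  | cons hd tl ih =>
    obtain ⟨u, c0⟩ := hd
    intro v c hvc
    have hu : ∀ b ∈ tl, u < b.1 := (List.pairwise_cons.1 hrs).1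
    have htl : tl.Pairwise (fun a b => a.1 < b.1) := (List.pairwise_cons.1 hrs).2
    rw [List.reverse_cons, pv_ltE_append]
    have hsumrev : pvSum tl.reverse = pvSum tl := by
      rw [pvSum, List.map_reverse, List.sum_reverse]; rfl
    rcases List.mem_cons.1 hvc with heq | hmem
    · rw [Prod.mk.injEq] at heq
      obtain ⟨rfl, rfl⟩ := heq
      have hnot : v ∉ (pvLtE tl.reverse 0).map Prod.fst := by
        rw [pv_ltE_keys, List.map_reverse, List.mem_reverse]
        intro hv
        obtain ⟨b, hb, hb1⟩ := List.mem_map.1 hv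
        exact absurd (hb1 ▸ hu b hb) (lt_irrefl v)
      rw [PySem.Dict.getD_eq_get?_getD, pv_get_mk_append_right _ _ _ hnot]
      have hget : (PySem.Dict.mk (pvLtE [(v, c)] (0 + pvSum tl.reverse))).get? v =
          some (0 + pvSum tl.reverse) := by
        simp only [pvLtE]
        rw [PySem.Dict.get?_mk_cons, if_pos (by simp)]
      rw [hget]
      have hfilter : tl.filter (fun a => decide (v < a.1)) = tl :=
        List.filter_eq_self.2 (fun a ha => by simpa using hu a ha)
      rw [List.filter_cons, if_neg (by simp), hfilter]
      simp [hsumrev]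
    · have hvu : u < v := by
        have := hu (v, c) hmem
        simpa using this
      have hin : v ∈ (pvLtE tl.reverse 0).map Prod.fst := by
        rw [pv_ltE_keys, List.map_reverse, List.mem_reverse]
        exact List.mem_map.2 ⟨(v, c), hmem, rfl⟩
      rw [PySem.Dict.getD_eq_get?_getD, pv_get_mk_append_left _ _ _ hin,
        ← PySem.Dict.getD_eq_get?_getD, ih htl v c hmem]
      have : ((u, c0) :: tl).filter (fun a => decide (v < a.1)) =
          tl.filter (fun a => decide (v < a.1)) := by
        rw [List.filter_cons, if_neg (by simpa using not_lt_of_gt hvu)]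
      rw [this]

theorem pv_comb (rs : List (Int × Int)) (hrs : rs.Pairwise (fun a b => a.1 < b.1)) :
    ∀ (i : Int) (G : PySem.Dict Int Int),
      (∀ v c, (v, c) ∈ rs → G.getD v 0 = pvSum (rs.filter (fun a => decide (v < a.1)))) →
      (pvLtE rs i).map (fun a => (a.1, G.getD a.1 0 - a.2)) = pvSweep (i + pvSum rs) rs i := by
  induction rs with
  | nil => intro i G _; simp [pvLtE, pvSweep]
  | cons hd tl ih =>
    obtain ⟨v, c⟩ := hd
    intro i G hG
    have hu : ∀ b ∈ tl, v < b.1 := (List.pairwise_cons.1 hrs).1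
    have htl : tl.Pairwise (fun a b => a.1 < b.1) := (List.pairwise_cons.1 hrs).2
    have hGv : G.getD v 0 = pvSum tl := by
      rw [hG v c (by simp)]
      have hfilter : ((v, c) :: tl).filter (fun a => decide (v < a.1)) = tl := by
        rw [List.filter_cons, if_neg (by simp)]
        exact List.filter_eq_self.2 (fun a ha => by simpa using hu a ha)
      rw [hfilter]
    have hGtl : ∀ w cc, (w, cc) ∈ tl → G.getD w 0 = pvSum (tl.filter (fun a => decide (w < a.1))) := by
      intro w cc hw
      rw [hG w cc (List.mem_cons_of_mem _ hw)]
      congr 1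
      rw [List.filter_cons, if_neg (by simpa using (hu (w, cc) hw).le)]
    have hns : i + pvSum ((v, c) :: tl) = (i + c) + pvSum tl := by
      simp [pvSum]; ring
    simp only [pvLtE, List.map_cons, pvSweep]
    rw [hns]
    refine List.cons_eq_cons.mpr ⟨?_, ?_⟩
    · rw [hGv]
      congr 1
      ring
    · exact ih htl (i + c) G hGtl

theorem pv_main (vals : List Int) : gravity_for vals = gravity_for_alt vals := by
  unfold gravity_for gravity_for_alt
  simp only [PySem.List.slice?_none_none_neg_one, Option.getD_some]
  set s := PySem.List.sorted vals (fun x => x) false with hsdef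
  have hs : s.Pairwise (fun a b => a ≤ b) := PySem.List.sorted_pairwise vals (fun x => x)
  have hlt : (pvLtLoop s 0 0 none PySem.Dict.empty).2.2 = PySem.Dict.mk (pvLtE (pvRuns s) 0) := by
    have := pv_L1 s hs 0 0 none PySem.Dict.empty (by simp)
      (fun x _ => PySem.Dict.contains_empty x)
    simpa using this
  have hgt := pv_L2 s hs
  rw [hlt, hgt]
  have hpw := pv_runs_pairwise hs
  have hkeysnd : ((pvLtE (pvRuns s) 0).map Prod.fst).Nodup := by
    rw [pv_ltE_keys]
    exact List.Pairwise.map Prod.fst (fun a b h => ne_of_lt h) hpw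
  have hfold := PySem.Dict.items_foldl_insert_fresh
      (l := pvLtE (pvRuns s) 0) (k := Prod.fst)
      (v := fun kv => (PySem.Dict.mk (pvLtE (pvRuns s).reverse 0)).getD kv.1 0 - kv.2)
      (d := PySem.Dict.empty)
      (fun a _ => PySem.Dict.contains_empty a.1) hkeysnd
  show ((pvLtE (pvRuns s) 0).foldl _ PySem.Dict.empty).items = _
  rw [hfold]
  show [] ++ _ = _
  rw [List.nil_append]
  rw [pv_comb (pvRuns s) hpw 0 _ (pv_G (pvRuns s) hpw)]
  rw [pv_sum_runs, zero_add]

-- ===== VERDICT (by name: the statement is the Claim_ definition above) =====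
theorem gravity_for_spec : Claim_equal_gravity_for := by
  intro vals _
  exact pv_main vals
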